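-- pv_equiv track=rewrite | github.com/subashreevs/applied-algorithms | Assignments/Assignment4/Question4.py | magical_recipe
-- ===== SOURCE A (Python) =====
-- def magical_recipe(total_cases: int, binary_strings: list[str]) -> list[int]:
--     MODULO_PRIME = 998244353  # Large prime number to handle exponential growth and prevent overflow
--     result_list = []  # List to store results for each test case
--
--     # Process each test case individually
--     for binary_string in binary_strings:
--         string_length = len(binary_string)  # Length of the binary string for this test case
--         # Initialize a dynamic programming array with zeros, where ad[i] stores the number of ways up to i
--         ways_to_map_binary_string = [0] * (string_length + 1)
--         ways_to_map_binary_string[0] = 1  # Base case: there is 1 way to have an empty initial binary string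
--
--         # Iterate over each character in the binary string
--         for current_position in range(1, string_length + 1):
--             # Case where we map a single 'a' or 'b' in the binary string
--             if current_position >= 1:
--                 if binary_string[current_position - 1] == 'a':
--                     # Update the current position by adding the previous position's value
--                     ways_to_map_binary_string[current_position] = (
--                         ways_to_map_binary_string[current_position] + ways_to_map_binary_string[current_position - 1]
--                     ) % MODULO_PRIME  # Single character 'a' (from '01' mapping)
--
--                 elif binary_string[current_position - 1] == 'b':
--                     # Update the current position by adding the previous position's value
--                     ways_to_map_binary_string[current_position] = (
--                         ways_to_map_binary_string[current_position] + ways_to_map_binary_string[current_position - 1]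
--                     ) % MODULO_PRIME  # Single character 'b' (from '10' mapping)
--
--             # Case where we map two characters 'ab' or 'ba' in the binary string
--             if current_position >= 2:
--                 if binary_string[current_position - 2:current_position] == 'ab':
--                     # Update the current position by adding the value from two positions back
--                     ways_to_map_binary_string[current_position] = (
--                         ways_to_map_binary_string[current_position] + ways_to_map_binary_string[current_position - 2]
--                     ) % MODULO_PRIME  # Two characters 'ab' (from '010' mapping)
--
--                 elif binary_string[current_position - 2:current_position] == 'ba':
--                     # Update the current position by adding the value from two positions back
--                     ways_to_map_binary_string[current_position] = (
--                         ways_to_map_binary_string[current_position] + ways_to_map_binary_string[current_position - 2]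
--                     ) % MODULO_PRIME  # Two characters 'ba' (from '101' mapping)
--
--         # Append the final result for this binary string to the result list
--         result_list.append(ways_to_map_binary_string[string_length])
--
--     return result_list  # Return the results for all test cases
-- ===== SOURCE B (Python) =====
-- # B: run-decomposition + Fibonacci. Answer per string = product over maximal
-- # alternating runs of Fib(run_len + 1) mod 998244353; 0 if any char not 'a'/'b'.
--
-- def _fib(n, mod):
--     # F(0)=0, F(1)=1, ... mod `mod`
--     a, b = 1, 0
--     for _ in range(n):
--         a, b = b, (a + b) % mod
--     return b
--
-- def _runs(s):
--     # lengths of maximal runs in which consecutive characters alternate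
--     runs = []
--     prev = s[0]
--     length = 1
--     for c in s[1:]:
--         if c != prev:
--             length += 1
--         else:
--             runs.append(length)
--             length = 1
--         prev = c
--     runs.append(length)
--     return runs
--
-- def magical_recipe(total_cases: int, binary_strings: list[str]) -> list[int]:
--     MOD = 998244353
--
--     def solve(s):
--         if not all(c in 'ab' for c in s):
--             return 0
--         if not s:
--             return 1
--         ans = 1
--         for length in _runs(s):
--             ans = ans * _fib(length + 1, MOD) % MOD
--         return ans
--
--     return [solve(s) for s in binary_strings]
-- ===== Notes on version B (the rewrite author's own statement) =====
-- stated objective: alternative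
-- what changed: Replaced A's per-position DP array (dp[i] = dp[i-1] if char valid, plus dp[i-2] if the last two chars alternate) by a direct decomposition of the string into maximal alternating runs, multiplying Fibonacci(run length + 1) mod 998244353 over the runs, with 0 for any string containing a character other than 'a'/'b'.
import Mathlib
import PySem

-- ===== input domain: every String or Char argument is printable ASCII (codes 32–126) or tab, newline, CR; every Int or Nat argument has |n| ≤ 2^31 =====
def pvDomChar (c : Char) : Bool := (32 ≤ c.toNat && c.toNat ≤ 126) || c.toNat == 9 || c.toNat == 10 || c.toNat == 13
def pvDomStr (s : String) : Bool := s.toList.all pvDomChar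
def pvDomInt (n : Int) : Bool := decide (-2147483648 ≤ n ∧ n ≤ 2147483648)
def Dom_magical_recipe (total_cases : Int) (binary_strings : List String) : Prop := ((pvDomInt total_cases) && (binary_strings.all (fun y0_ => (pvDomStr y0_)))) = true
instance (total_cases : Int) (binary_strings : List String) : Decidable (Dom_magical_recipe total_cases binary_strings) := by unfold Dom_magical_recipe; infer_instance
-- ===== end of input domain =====

-- B replaces A's per-position DP array by a run decomposition: the answer for a
-- string is the product over maximal alternating runs of Fib(run length + 1)
-- mod 998244353 (0 if any character is not 'a'/'b'); alternative algorithm, not claimed faster.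

-- ===== PORT A =====
-- one iteration of A's inner loop (current_position = i), updating the DP array
def pvBodyA (s : List Char) (dp : List Int) (i : Nat) : List Int :=
  let dp1 :=
    if 1 ≤ i then
      if s.getD (i - 1) ' ' = 'a' then
        dp.set i (PySem.Int.mod (dp.getD i 0 + dp.getD (i - 1) 0) 998244353)
      else if s.getD (i - 1) ' ' = 'b' then
        dp.set i (PySem.Int.mod (dp.getD i 0 + dp.getD (i - 1) 0) 998244353)
      else dp
    else dp
  if 2 ≤ i then
    if s.getD (i - 2) ' ' = 'a' ∧ s.getD (i - 1) ' ' = 'b' then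
      dp1.set i (PySem.Int.mod (dp1.getD i 0 + dp1.getD (i - 2) 0) 998244353)
    else if s.getD (i - 2) ' ' = 'b' ∧ s.getD (i - 1) ' ' = 'a' then
      dp1.set i (PySem.Int.mod (dp1.getD i 0 + dp1.getD (i - 2) 0) 998244353)
    else dp1
  else dp1

def magical_recipe (total_cases : Int) (binary_strings : List String) : List Int :=
  binary_strings.foldl (fun result_list binary_string =>
    let s := binary_string.toList
    let n := s.length
    let dp0 := (List.replicate (n + 1) (0 : Int)).set 0 1
    let dpF := (List.range' 1 n).foldl (pvBodyA s) dp0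
    result_list ++ [dpF.getD n 0]) []

-- ===== PORT B =====
-- _fib from Source B: iterative Fibonacci mod 998244353
def pvFibLoop : Nat → Int × Int → Int × Int
  | 0, ab => ab
  | k + 1, (a, b) => pvFibLoop k (b, (a + b) % 998244353)

def pvFibB (n : Nat) : Int := (pvFibLoop n (1, 0)).2

-- _runs from Source B: lengths of maximal alternating runs
def pvRunsGo : List Char → Char → Nat → List Nat
  | [], _, len => [len]
  | c :: rest, prev, len =>
      if c ≠ prev then pvRunsGo rest c (len + 1) else len :: pvRunsGo rest c 1

def pvSolveB (s : List Char) : Int :=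
  if s.all (fun c => c == 'a' || c == 'b') then
    match s with
    | [] => 1
    | c :: rest =>
        (pvRunsGo rest c 1).foldl (fun ans len => ans * pvFibB (len + 1) % 998244353) 1
  else 0

def magical_recipe_alt (total_cases : Int) (binary_strings : List String) : List Int :=
  binary_strings.map (fun binary_string => pvSolveB binary_string.toList)

-- ===== PRECONDITION & SPEC =====
def Spec_magical_recipe (total_cases : Int) (binary_strings : List String) (out : List Int) : Prop := out = magical_recipe_alt total_cases binary_strings
instance (total_cases : Int) (binary_strings : List String) (out : List Int) : Decidable (Spec_magical_recipe total_cases binary_strings out) := by unfold Spec_magical_recipe; infer_instance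

-- ===== CLAIM (what is proved, stated in full; the proofs are below) =====
def Claim_equal_magical_recipe : Prop := ∀ (total_cases : Int) (binary_strings : List String), Dom_magical_recipe total_cases binary_strings → Spec_magical_recipe total_cases binary_strings (magical_recipe total_cases binary_strings)

-- ===== LEMMAS AND PROOFS =====

-- A's DP value at position i, as a pure two-step recurrence mirroring pvBodyA
def pvD (s : List Char) : Nat → Int
  | 0 => 1
  | 1 =>
      if s.getD 0 ' ' = 'a' then (0 + 1) % 998244353
      else if s.getD 0 ' ' = 'b' then (0 + 1) % 998244353
      else 0
  | i + 2 =>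
      let t1 :=
        if s.getD (i + 1) ' ' = 'a' then (0 + pvD s (i + 1)) % 998244353
        else if s.getD (i + 1) ' ' = 'b' then (0 + pvD s (i + 1)) % 998244353
        else 0
      if s.getD i ' ' = 'a' ∧ s.getD (i + 1) ' ' = 'b' then (t1 + pvD s i) % 998244353
      else if s.getD i ' ' = 'b' ∧ s.getD (i + 1) ' ' = 'a' then (t1 + pvD s i) % 998244353
      else t1

-- Fibonacci mod 998244353 (F 1 = F 2 = 1) by two-step recursion
def pvG : Nat → Int
  | 0 => 0
  | 1 => 1
  | n + 2 => (pvG n + pvG (n + 1)) % 998244353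

lemma pvMod_eq (x : Int) : PySem.Int.mod x 998244353 = x % 998244353 :=
  PySem.Int.mod_eq_emod_of_pos (by norm_num)

lemma pvFibLoop_G (n k : Nat) : pvFibLoop n (pvG k, pvG (k + 1)) = (pvG (n + k), pvG (n + k + 1)) := by
  induction n generalizing k with
  | zero => simp [pvFibLoop]
  | succ m ih =>
      have : pvFibLoop (m + 1) (pvG k, pvG (k + 1)) = pvFibLoop m (pvG (k + 1), pvG (k + 2)) := by
        simp [pvFibLoop, pvG]
      rw [this, ih (k + 1)]
      ring_nf

lemma pvFibB_eq (n : Nat) : pvFibB n = pvG n := by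
  cases n with
  | zero => simp [pvFibB, pvFibLoop, pvG]
  | succ m =>
      have h1 : pvFibLoop (m + 1) (1, 0) = pvFibLoop m ((0 : Int), (1 : Int)) := by
        simp [pvFibLoop]
      have h2 := pvFibLoop_G m 0
      simp only [pvG] at h2
      simp [pvFibB, h1, h2]

-- array helpers
lemma pvGetD_map_range (k i : Nat) (g : Nat → Int) :
    ((List.range k).map g).getD i 0 = if i < k then g i else 0 := by
  simp [List.getD_eq_getElem?_getD]
  split <;> simp_all

lemma pvSet_map_range (k i : Nat) (h : i < k) (g : Nat → Int) (v : Int) :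
    ((List.range k).map g).set i v = (List.range k).map (fun j => if j = i then v else g j) := by
  apply List.ext_getElem (by simp)
  intro j hj1 hj2
  simp at hj2
  rw [List.getElem_set]
  simp [List.getElem_map, List.getElem_range]
  split
  · simp_all
  · omega

def pvArr (s : List Char) (m : Nat) : List Int :=
  (List.range (s.length + 1)).map (fun j => if j ≤ m then pvD s j else 0)

lemma pvArr0 (s : List Char) :
    (List.replicate (s.length + 1) (0 : Int)).set 0 1 = pvArr s 0 := by
  apply List.ext_getElem (by simp [pvArr])
  intro j hj1 hj2
  rw [List.getElem_set]
  simp [pvArr, List.getElem_replicate, List.getElem_map, List.getElem_range]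
  split
  · rename_i hh; have : j = 0 := by omega
    subst this; simp [pvD]
  · omega

lemma pvArr_getD (s : List Char) (m j : Nat) (hj : j < s.length + 1) :
    (pvArr s m).getD j 0 = if j ≤ m then pvD s j else 0 := by
  rw [pvArr, pvGetD_map_range]
  simp [hj]

lemma pvArrSet (s : List Char) (i : Nat) (h1 : 1 ≤ i) (h2 : i < s.length + 1)
    (v : Int) (hv : v = pvD s i) : (pvArr s (i - 1)).set i v = pvArr s i := by
  unfold pvArr
  rw [pvSet_map_range _ _ h2]
  apply List.map_congr_left
  intro j hj
  simp [List.mem_range] at hj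
  by_cases hji : j = i
  · simp [hji, hv]
  · have hiff : (j ≤ i - 1) = (j ≤ i) := by
      apply propext; constructor <;> intro <;> omega
    simp [hji, hiff]

lemma pvArrId (s : List Char) (i : Nat) (h1 : 1 ≤ i) (hv : pvD s i = 0) :
    pvArr s (i - 1) = pvArr s i := by
  unfold pvArr
  apply List.map_congr_left
  intro j hj
  simp [List.mem_range] at hj
  by_cases hji : j = i
  · simp [hji, hv]
  · have hiff : (j ≤ i - 1) = (j ≤ i) := by
      apply propext; constructor <;> intro <;> omega
    simp [hiff]

lemma pvStep1 (s : List Char) (h2 : 1 ≤ s.length) :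
    pvBodyA s (pvArr s 0) 1 = pvArr s 1 := by
  have hri : (pvArr s 0).getD 1 0 = 0 := by
    rw [pvArr_getD s 0 1 (by omega)]; simp
  have hr1 : (pvArr s 0).getD 0 0 = 1 := by
    rw [pvArr_getD s 0 0 (by omega)]; simp [pvD]
  unfold pvBodyA
  simp only [show ¬((2:Nat) ≤ 1) by decide, if_false, le_refl, if_true,
    show (1:Nat) - 1 = 0 from rfl, hri, hr1, pvMod_eq]
  split_ifs <;>
    first
      | exact pvArrSet s 1 (by omega) (by omega) _ (by simp only [pvD]; split_ifs <;> first | rfl | simp_all)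
      | exact pvArrId s 1 (by omega) (by simp only [pvD]; split_ifs <;> first | rfl | simp_all)

lemma pvStep2 (s : List Char) (m : Nat) (h2 : m + 2 ≤ s.length) :
    pvBodyA s (pvArr s (m + 1)) (m + 2) = pvArr s (m + 2) := by
  have hri : (pvArr s (m + 1)).getD (m + 2) 0 = 0 := by
    rw [pvArr_getD s (m + 1) (m + 2) (by omega)]
    simp
  have hr1 : (pvArr s (m + 1)).getD (m + 2 - 1) 0 = pvD s (m + 1) := by
    rw [show m + 2 - 1 = m + 1 from rfl, pvArr_getD s (m + 1) (m + 1) (by omega)]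
    simp
  have hr2 : (pvArr s (m + 1)).getD (m + 2 - 2) 0 = pvD s m := by
    rw [show m + 2 - 2 = m from rfl, pvArr_getD s (m + 1) m (by omega)]
    simp
  have hsetr : ∀ v : Int, ((pvArr s (m + 1)).set (m + 2) v).getD (m + 2) 0 = v := by
    intro v
    rw [List.getD_eq_getElem?_getD, List.getElem?_set_self (by simp [pvArr]; omega)]
    simp
  have hsetr2 : ∀ v : Int, ((pvArr s (m + 1)).set (m + 2) v).getD (m + 2 - 2) 0 = pvD s m := by
    intro v
    rw [List.getD_eq_getElem?_getD, List.getElem?_set_ne (by omega), ← List.getD_eq_getElem?_getD]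
    exact hr2
  unfold pvBodyA
  simp only [show (1:Nat) ≤ m + 2 by omega, if_true, show (2:Nat) ≤ m + 2 by omega,
    show m + 2 - 1 = m + 1 from rfl]
  split_ifs <;>
    (try simp only [hri, hr1, hr2, hsetr, hsetr2, List.set_set, pvMod_eq]) <;>
    first
      | exact pvArrSet s (m + 2) (by omega) (by omega) _ (by simp only [pvD]; split_ifs <;> first | rfl | simp_all)
      | exact pvArrId s (m + 2) (by omega) (by simp only [pvD]; split_ifs <;> first | rfl | simp_all)

lemma pvStep (s : List Char) (i : Nat) (h1 : 1 ≤ i) (h2 : i ≤ s.length) :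
    pvBodyA s (pvArr s (i - 1)) i = pvArr s i := by
  match i, h1 with
  | 1, _ => exact pvStep1 s h2
  | (m + 2), _ => exact pvStep2 s m h2

lemma pvFold (s : List Char) (m : Nat) (hm : m ≤ s.length) :
    (List.range' 1 m).foldl (pvBodyA s) ((List.replicate (s.length + 1) (0 : Int)).set 0 1)
      = pvArr s m := by
  induction m with
  | zero => simpa using pvArr0 s
  | succ k ih =>
      have hr : List.range' 1 (k + 1) = List.range' 1 k ++ [1 + k] := by
        have := List.range'_concat (step := 1) (s := 1) (n := k)
        simpa using this
      rw [hr, List.foldl_append, ih (by omega)]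
      have h := pvStep s (k + 1) (by omega) (by omega)
      simpa [Nat.add_comm] using h

lemma pvA_string (s : List Char) :
    ((List.range' 1 s.length).foldl (pvBodyA s)
      ((List.replicate (s.length + 1) (0 : Int)).set 0 1)).getD s.length 0 = pvD s s.length := by
  rw [pvFold s s.length le_rfl, pvArr, pvGetD_map_range]
  simp

-- invalid character ⇒ 0 from that position on
lemma pvD_invalid (s : List Char) :
    ∀ i, (∃ k, k < i ∧ ¬(s.getD k ' ' = 'a' ∨ s.getD k ' ' = 'b')) → pvD s i = 0 := by
  intro i
  induction i using Nat.strong_induction_on with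
  | _ i ih =>
    intro h
    rcases h with ⟨k, hk, hkv⟩
    push_neg at hkv
    obtain ⟨hka, hkb⟩ := hkv
    simp only [List.getD_eq_getElem?_getD] at hka hkb
    match i, hk with
    | 1, _ =>
        have hk0 : k = 0 := by omega
        subst hk0
        simp [pvD, hka, hkb]
    | (m + 2), _ =>
        by_cases hkm : k = m + 1
        · subst hkm
          simp [pvD, hka, hkb]
        · have h1 : pvD s (m + 1) = 0 :=
            ih (m + 1) (by omega) ⟨k, by omega, by push_neg; exact ⟨hka, hkb⟩⟩
          by_cases hkm2 : k = m
          · subst hkm2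
            simp [pvD, h1, hka, hkb]
          · have h0 : pvD s m = 0 :=
              ih m (by omega) ⟨k, by omega, by push_neg; exact ⟨hka, hkb⟩⟩
            simp [pvD, h1, h0]

-- mod algebra
lemma pvMulAdd (a x y : Int) :
    (a * x % 998244353 + a * y % 998244353) % 998244353 = a * ((x + y) % 998244353) % 998244353 := by
  conv_lhs => rw [Int.emod_add_emod, Int.add_emod_emod]
  rw [← Int.mul_add, Int.mul_emod, Int.mul_emod a ((x + y) % 998244353), Int.emod_emod_of_dvd _ dvd_rfl]

lemma pvEmodSelf (x : Int) : x % 998244353 % 998244353 = x % 998244353 :=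
  Int.emod_emod_of_dvd x dvd_rfl

-- the main scan: within a valid string, the run fold reproduces pvD
lemma pvScan (s : List Char) (hval : ∀ c ∈ s, c = 'a' ∨ c = 'b') :
    ∀ rest prev len acc i, 1 ≤ i → i ≤ s.length → 1 ≤ len →
      s.drop i = rest → s.getD (i - 1) ' ' = prev →
      pvD s i = acc * pvG (len + 1) % 998244353 →
      pvD s (i - 1) = acc * pvG len % 998244353 →
      (pvRunsGo rest prev len).foldl (fun a l => a * pvG (l + 1) % 998244353) acc
        = pvD s s.length := by
  intro rest
  induction rest with
  | nil =>
      intro prev len acc i h1 h2 hlen hdrop hprev hDi hDi1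
      have hlen2 : s.length - i = 0 := by
        have := congrArg List.length hdrop; simpa using this
      have hi : s.length = i := by omega
      simp only [pvRunsGo, List.foldl_cons, List.foldl_nil]
      rw [hi, hDi]
  | cons c rest' ih =>
      intro prev len acc i h1 h2 hlen hdrop hprev hDi hDi1
      obtain ⟨i', rfl⟩ : ∃ i', i = i' + 1 := ⟨i - 1, by omega⟩
      simp only [Nat.add_sub_cancel] at hprev hDi1
      have hlt : i' + 1 < s.length := by
        have := congrArg List.length hdrop; simp at this; omega
      have hgi? : s[i' + 1]? = some c := by
        have h0 : (s.drop (i' + 1))[0]? = some c := by rw [hdrop]; rfl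
        rwa [List.getElem?_drop] at h0
      have hgi : s.getD (i' + 1) ' ' = c := by
        simp [List.getD_eq_getElem?_getD, hgi?]
      have hdrop' : s.drop (i' + 2) = rest' := by
        have : (s.drop (i' + 1)).drop 1 = rest' := by rw [hdrop]; rfl
        rwa [List.drop_drop] at this
      have hvc : c = 'a' ∨ c = 'b' := by
        apply hval
        exact List.mem_of_getElem? hgi?
      have hvp : prev = 'a' ∨ prev = 'b' := by
        apply hval
        rw [← hprev, List.getD_eq_getElem s ' ' (by omega)]
        exact List.getElem_mem _
      have hD2 : pvD s (i' + 2) =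
          if prev ≠ c then (pvD s (i' + 1) + pvD s i') % 998244353 else pvD s (i' + 1) := by
        simp only [pvD, hprev, hgi]
        rcases hvc with hc | hc <;> rcases hvp with hp | hp <;> subst hc <;> subst hp <;>
          simp [hDi]
      by_cases hne : c ≠ prev
      · rw [pvRunsGo]
        rw [if_pos hne]
        apply ih c (len + 1) acc (i' + 2) (by omega) (by omega) (by omega) hdrop'
          (by simpa using hgi)
        · rw [hD2, if_pos (Ne.symm hne), hDi, hDi1, pvMulAdd]
          have : pvG (len + 2) = (pvG len + pvG (len + 1)) % 998244353 := rfl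
          rw [this, Int.add_comm]
        · simpa using hDi
      · push_neg at hne
        rw [pvRunsGo]
        rw [if_neg (by simp [hne]), List.foldl_cons]
        apply ih c 1 (acc * pvG (len + 1) % 998244353) (i' + 2) (by omega) (by omega)
          (by omega) hdrop' (by simpa using hgi)
        · rw [hD2, if_neg (by simp [hne]), hDi]
          have hG2 : pvG 2 = 1 := by norm_num [pvG]
          rw [hG2, Int.mul_one, pvEmodSelf]
        · rw [show i' + 2 - 1 = i' + 1 from rfl, hDi]
          have hG1 : pvG 1 = 1 := rfl
          rw [hG1, Int.mul_one, pvEmodSelf]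

lemma pvPerString (s : List Char) :
    pvD s s.length = pvSolveB s := by
  unfold pvSolveB
  by_cases hall : s.all (fun c => c == 'a' || c == 'b')
  · rw [if_pos hall]
    cases s with
    | nil => simp [pvD]
    | cons c rest =>
        have hval : ∀ x ∈ (c :: rest), x = 'a' ∨ x = 'b' := by
          intro x hx
          have := List.all_eq_true.mp hall x hx
          simpa using this
        have hvc : c = 'a' ∨ c = 'b' := hval c (by simp)
        have h := pvScan (c :: rest) hval rest c 1 1 1 (le_refl 1) (by simp) (le_refl 1)
          (by rfl) (by rfl) ?_ ?_
        · have hfun : (fun (a : Int) (l : Nat) => a * pvFibB (l + 1) % 998244353)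
              = (fun (a : Int) (l : Nat) => a * pvG (l + 1) % 998244353) := by
            funext a l
            rw [pvFibB_eq]
          rw [hfun]
          exact h.symm
        · rcases hvc with hc | hc <;> subst hc <;> norm_num [pvD, pvG]
        · norm_num [pvD, pvG]
  · rw [if_neg hall]
    have hex : ∃ x ∈ s, ¬(x = 'a' ∨ x = 'b') := by
      simpa using hall
    obtain ⟨x, hxs, hxv⟩ := hex
    obtain ⟨k, hk, hkx⟩ := List.getElem_of_mem hxs
    apply pvD_invalid
    refine ⟨k, hk, ?_⟩
    rw [List.getD_eq_getElem s ' ' hk, hkx]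
    exact hxv

lemma pvFoldAppend (f : String → Int) (bs : List String) :
    ∀ acc : List Int, bs.foldl (fun r x => r ++ [f x]) acc = acc ++ bs.map f := by
  induction bs with
  | nil => simp
  | cons b bs ih => intro acc; simp [ih]

-- ===== VERDICT (by name: the statement is the Claim_ definition above) =====
theorem magical_recipe_spec : Claim_equal_magical_recipe := by
  intro total_cases binary_strings _
  unfold Spec_magical_recipe magical_recipe magical_recipe_alt
  rw [pvFoldAppend]
  simp only [List.nil_append]
  apply List.map_congr_left
  intro str _
  rw [pvA_string, pvPerString]
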